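-- pv_equiv track=rewrite | github.com/LucasNakamuraB/UEM | FA/Listas_FA-ED-main/lst_repet2.py | quant_soma
-- ===== SOURCE A (Python) =====
-- def quant_soma(lst, n):
--     '''
--     produz um numero inteiro representando a quantidade de elementos de *lst*
--     que precisam ser somados para superar *n*, se não for possível superar *n*,
--     retorna -1
--
--     exemplo
--
--     >>> quant_soma([1,1,0,1], 2)
--     4
--     >>> quant_soma([1,0,0,1], 3)
--     -1
--
--     '''
--     num = 0
--     i = 0
--     soma = 0
--     while i < len(lst) and soma <= n:
--         num += 1
--         soma = soma + lst[i]
--         i += 1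
--
--     if soma > n:
--         return num
--     else:
--         return -1
-- ===== SOURCE B (Python) =====
-- def quant_soma(lst, n):
--     # Build all running cumulative sums (including the empty prefix 0),
--     # then search for the first one strictly greater than n.
--     cums = [0]
--     for x in lst:
--         cums.append(cums[-1] + x)
--     return next((i for i, s in enumerate(cums) if s > n), -1)
-- ===== Notes on version B (the rewrite author's own statement) =====
-- stated objective: alternative
-- what changed: B precomputes the full prefix-sum list (including the empty prefix 0) and then searches it for the first value exceeding n, instead of A's single while-loop that accumulates a sum and a counter inline with an early exit.
import Mathlib
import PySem

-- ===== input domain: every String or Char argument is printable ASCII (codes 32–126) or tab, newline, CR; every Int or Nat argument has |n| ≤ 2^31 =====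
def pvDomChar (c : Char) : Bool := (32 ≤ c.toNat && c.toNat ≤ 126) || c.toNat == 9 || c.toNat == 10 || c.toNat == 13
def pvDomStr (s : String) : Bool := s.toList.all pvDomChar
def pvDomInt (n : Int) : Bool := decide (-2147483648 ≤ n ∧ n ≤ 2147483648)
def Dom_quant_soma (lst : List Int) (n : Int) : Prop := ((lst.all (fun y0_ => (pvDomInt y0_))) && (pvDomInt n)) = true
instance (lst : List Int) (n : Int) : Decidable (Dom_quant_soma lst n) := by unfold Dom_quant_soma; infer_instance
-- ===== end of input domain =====

-- B builds the full prefix-sum list and then searches it for the first value > n,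
-- instead of A's inline accumulation with early exit; same O(n) cost (objective: alternative).

-- ===== PORT A =====
-- A's while loop: i walks lst in order, so the loop is recursion on the list,
-- carrying num and soma; on exit the post-check 'if soma > n then num else -1'.
def quantSomaLoopA (n : Int) : List Int → Int → Int → Int
  | [], num, soma => if soma > n then num else -1
  | x :: rest, num, soma =>
      if soma ≤ n then quantSomaLoopA n rest (num + 1) (soma + x)
      else if soma > n then num else -1

def quant_soma (lst : List Int) (n : Int) : Int := quantSomaLoopA n lst 0 0

-- ===== PORT B =====
-- cums = [0]; for x in lst: cums.append(cums[-1] + x)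
def quantCums : List Int → Int → List Int
  | [], acc => [acc]
  | x :: rest, acc => acc :: quantCums rest (acc + x)

-- next((i for i, s in enumerate(cums) if s > n), -1)
def quantFindIdx (n : Int) (i : Int) : List Int → Int
  | [] => -1
  | s :: rest => if s > n then i else quantFindIdx n (i + 1) rest

def quant_soma_alt (lst : List Int) (n : Int) : Int := quantFindIdx n 0 (quantCums lst 0)

-- ===== PRECONDITION & SPEC =====
def Spec_quant_soma (lst : List Int) (n : Int) (out : Int) : Prop := out = quant_soma_alt lst n
instance (lst : List Int) (n : Int) (out : Int) : Decidable (Spec_quant_soma lst n out) := by unfold Spec_quant_soma; infer_instance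

-- ===== CLAIM (what is proved, stated in full; the proofs are below) =====
def Claim_equal_quant_soma : Prop := ∀ (lst : List Int) (n : Int), Dom_quant_soma lst n → Spec_quant_soma lst n (quant_soma lst n)

-- ===== LEMMAS AND PROOFS =====
theorem quantSomaLoopA_eq (n : Int) (lst : List Int) :
    ∀ (num soma : Int), quantSomaLoopA n lst num soma = quantFindIdx n num (quantCums lst soma) := by
  induction lst with
  | nil =>
      intro num soma
      simp [quantSomaLoopA, quantCums, quantFindIdx]
  | cons x rest ih =>
      intro num soma
      simp only [quantSomaLoopA, quantCums, quantFindIdx]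
      by_cases h : soma ≤ n
      · have h' : ¬ soma > n := by omega
        simp [h, h', ih]
      · have h' : soma > n := by omega
        simp [h, h']

-- ===== VERDICT (by name: the statement is the Claim_ definition above) =====
theorem quant_soma_spec : Claim_equal_quant_soma := by
  intro lst n _
  unfold Spec_quant_soma quant_soma quant_soma_alt
  exact quantSomaLoopA_eq n lst 0 0
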